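-- pv_equiv track=rewrite | github.com/wjl57/SudokuSolver | SudokuBoard.py | rotate_board_ccw
-- ===== SOURCE A (Python) =====
-- def rotate_board_ccw(board, n=1):
--     def rotate_ccw(board):
--         rotated_board = [[None for _ in range(0, 9)] for _ in range(0, 9)]
--         for y in range(0, 9):
--             for x in range(0, 9):
--                 rotated_board[y][x] = board[x][8-y]
--         return rotated_board
--
--     for _ in range(0, n % 4):
--         board = rotate_ccw(board)
--     return board
-- ===== SOURCE B (Python) =====
-- def rotate_board_ccw(board, n=1):
--     r = n % 4
--     if r == 0:
--         return board
--     if r == 1: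
--         src = lambda y, x: board[x][8 - y]
--     elif r == 2:
--         src = lambda y, x: board[8 - y][8 - x]
--     else:
--         src = lambda y, x: board[8 - x][y]
--     return [[src(y, x) for x in range(9)] for y in range(9)]
-- ===== Notes on version B (the rewrite author's own statement) =====
-- stated objective: simpler
-- what changed: Instead of repeatedly applying a one-step rotation r = n%4 times (building up to 3 intermediate 9x9 boards), B computes r once and fills a single 9x9 output in one nested pass using the per-r closed-form source index (r=1: [x][8-y], r=2: [8-y][8-x], r=3: [8-x][y]), returning the board untouched when r=0.
import Mathlib
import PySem

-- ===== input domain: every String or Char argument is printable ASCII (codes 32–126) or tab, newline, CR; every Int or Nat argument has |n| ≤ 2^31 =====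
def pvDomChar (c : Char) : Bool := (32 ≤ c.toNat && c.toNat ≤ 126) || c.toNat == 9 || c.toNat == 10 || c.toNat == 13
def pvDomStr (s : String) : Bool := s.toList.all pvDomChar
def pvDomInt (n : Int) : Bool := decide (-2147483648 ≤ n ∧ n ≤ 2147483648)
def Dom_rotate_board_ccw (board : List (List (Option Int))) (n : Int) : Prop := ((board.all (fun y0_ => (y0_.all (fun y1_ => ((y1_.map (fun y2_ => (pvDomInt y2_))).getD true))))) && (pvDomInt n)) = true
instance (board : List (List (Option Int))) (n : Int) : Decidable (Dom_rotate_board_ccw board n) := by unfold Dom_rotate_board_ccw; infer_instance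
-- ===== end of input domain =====

-- B replaces A's repeated one-step rotation (r = n%4 successive passes) by a single
-- nested pass with a per-r closed-form source index; return values proved equal on Pre_.

-- ===== PORT A =====
-- board[i][j] (both indices in range on every Pre_ input; getD none is junk outside)
def pvCellA (b : List (List (Option Int))) (i j : Int) : Option Int :=
  (PySem.List.pyGet? ((PySem.List.pyGet? b i).getD []) j).getD none

-- inner rotate_ccw: the 9x9 grid whose (y,x) entry is board[x][8-y]
def pvRotCCW (b : List (List (Option Int))) : List (List (Option Int)) :=
  (List.range 9).map (fun (y : Nat) => (List.range 9).map (fun (x : Nat) => pvCellA b (x : Int) (8 - (y : Int))))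

def rotate_board_ccw (board : List (List (Option Int))) (n : Int) : List (List (Option Int)) :=
  (PySem.List.pyRange 0 (PySem.Int.mod n 4) 1).foldl (fun b _ => pvRotCCW b) board

-- ===== PORT B =====
def pvCellB (b : List (List (Option Int))) (i j : Int) : Option Int :=
  (PySem.List.pyGet? ((PySem.List.pyGet? b i).getD []) j).getD none

def rotate_board_ccw_alt (board : List (List (Option Int))) (n : Int) : List (List (Option Int)) :=
  let r := PySem.Int.mod n 4
  if r = 0 then board
  else
    (List.range 9).map (fun (y : Nat) => (List.range 9).map (fun (x : Nat) =>
      if r = 1 then pvCellB board (x : Int) (8 - (y : Int))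
      else if r = 2 then pvCellB board (8 - (y : Int)) (8 - (x : Int))
      else pvCellB board (8 - (x : Int)) (y : Int)))

-- ===== PRECONDITION & SPEC =====
-- Pre_ excludes exactly the inputs where Python A raises IndexError: when n % 4 ≠ 0 the
-- inner rotation reads board[x][8-y] for all x,y in 0..8, so the board needs at least 9
-- rows and each of the first 9 rows at least 9 cells.
def Pre_rotate_board_ccw (board : List (List (Option Int))) (n : Int) : Prop :=
  PySem.Int.mod n 4 = 0 ∨ (9 ≤ board.length ∧ ∀ row ∈ board.take 9, 9 ≤ row.length)
instance (board : List (List (Option Int))) (n : Int) : Decidable (Pre_rotate_board_ccw board n) := by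
  unfold Pre_rotate_board_ccw; infer_instance

def pvWitness_rotate_board_ccw : List (List (Option Int)) × Int :=
  (List.replicate 9 (List.replicate 9 (none : Option Int)), 1)

def Spec_rotate_board_ccw (board : List (List (Option Int))) (n : Int) (out : List (List (Option Int))) : Prop := out = rotate_board_ccw_alt board n
instance (board : List (List (Option Int))) (n : Int) (out : List (List (Option Int))) : Decidable (Spec_rotate_board_ccw board n out) := by unfold Spec_rotate_board_ccw; infer_instance

-- ===== CLAIM (what is proved, stated in full; the proofs are below) =====
def Claim_equal_rotate_board_ccw : Prop := ∀ (board : List (List (Option Int))) (n : Int), Dom_rotate_board_ccw board n → Pre_rotate_board_ccw board n → Spec_rotate_board_ccw board n (rotate_board_ccw board n)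

-- ===== LEMMAS AND PROOFS =====

theorem cellB_eq_cellA : pvCellB = pvCellA := rfl

-- reading a cell of the rotated board = reading the source board at the composed index
theorem cell_rot (b : List (List (Option Int))) (i j : Int)
    (hi0 : 0 ≤ i) (hi : i < 9) (hj0 : 0 ≤ j) (hj : j < 9) :
    pvCellA (pvRotCCW b) i j = pvCellA b j (8 - i) := by
  obtain ⟨x, rfl⟩ : ∃ x : Nat, (x : Int) = i := ⟨i.toNat, Int.toNat_of_nonneg hi0⟩
  obtain ⟨y, rfl⟩ : ∃ y : Nat, (y : Int) = j := ⟨j.toNat, Int.toNat_of_nonneg hj0⟩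
  have hx : x < 9 := by exact_mod_cast hi
  have hy : y < 9 := by exact_mod_cast hj
  unfold pvCellA pvRotCCW
  rw [PySem.List.pyGet?_natCast, PySem.List.pyGet?_natCast]
  simp [pvCellA, hx, hy]

theorem rot1_eq (b : List (List (Option Int))) :
    pvRotCCW b
      = (List.range 9).map (fun (y : Nat) => (List.range 9).map (fun (x : Nat) =>
          pvCellA b (x : Int) (8 - (y : Int)))) := rfl

theorem rot2_eq (b : List (List (Option Int))) :
    pvRotCCW (pvRotCCW b)
      = (List.range 9).map (fun (y : Nat) => (List.range 9).map (fun (x : Nat) =>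
          pvCellA b (8 - (y : Int)) (8 - (x : Int)))) := by
  rw [rot1_eq (pvRotCCW b)]
  refine List.map_congr_left (fun y hy => List.map_congr_left (fun x hx => ?_))
  rw [List.mem_range] at hx hy
  rw [cell_rot b (x : Int) (8 - (y : Int)) (by positivity) (by exact_mod_cast hx)
      (by omega) (by omega)]

theorem rot3_eq (b : List (List (Option Int))) :
    pvRotCCW (pvRotCCW (pvRotCCW b))
      = (List.range 9).map (fun (y : Nat) => (List.range 9).map (fun (x : Nat) =>
          pvCellA b (8 - (x : Int)) (y : Int))) := by
  rw [rot1_eq (pvRotCCW (pvRotCCW b))]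
  refine List.map_congr_left (fun y hy => List.map_congr_left (fun x hx => ?_))
  rw [List.mem_range] at hx hy
  rw [cell_rot (pvRotCCW b) (x : Int) (8 - (y : Int)) (by positivity)
        (by exact_mod_cast hx) (by omega) (by omega),
      cell_rot b (8 - (y : Int)) (8 - (x : Int)) (by omega) (by omega) (by omega) (by omega)]
  congr 1
  omega

-- ===== VERDICT (by name: the statement is the Claim_ definition above) =====
theorem rotate_board_ccw_spec : Claim_equal_rotate_board_ccw := by
  intro board n _hdom _hpre
  unfold Spec_rotate_board_ccw rotate_board_ccw rotate_board_ccw_alt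
  have hmod : PySem.Int.mod n 4 = n % 4 := PySem.Int.mod_eq_emod_of_pos (by norm_num)
  have h0 : 0 ≤ n % 4 := Int.emod_nonneg n (by norm_num)
  have h4 : n % 4 < 4 := Int.emod_lt_of_pos n (by norm_num)
  have : n % 4 = 0 ∨ n % 4 = 1 ∨ n % 4 = 2 ∨ n % 4 = 3 := by omega
  rcases this with h | h | h | h <;> rw [hmod, h]
  · simp
  · norm_num [show PySem.List.pyRange 0 1 1 = [0] from by decide, List.foldl, cellB_eq_cellA]
    exact rot1_eq board
  · norm_num [show PySem.List.pyRange 0 2 1 = [0, 1] from by decide, List.foldl,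
      cellB_eq_cellA, rot2_eq]
  · norm_num [show PySem.List.pyRange 0 3 1 = [0, 1, 2] from by decide, List.foldl,
      cellB_eq_cellA, rot3_eq]
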